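-- pv_equiv track=rewrite | github.com/Paddu2006/mental-health-screener | mental_health_screener.py | score_stress
-- ===== SOURCE A (Python) =====
-- def score_stress(responses):
--     """Score Perceived Stress Scale."""
--     # Reverse score positive items (4,5,7,8 — 0-indexed: 3,4,6,7)
--     positive_items = [3, 4, 6, 7]
--     adjusted = []
--     for i, r in enumerate(responses):
--         if i in positive_items:
--             adjusted.append(4 - r)
--         else:
--             adjusted.append(r)
--     score = sum(adjusted)
--     if score <= 13:
--         severity = "Low Stress"
--         color    = "#4CAF50"
--     elif score <= 26:
--         severity = "Moderate Stress"
--         color    = "#FF9800"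
--     else:
--         severity = "High Stress"
--         color    = "#E91E63"
--     return score, severity, color
-- ===== SOURCE B (Python) =====
-- def score_stress(responses):
--     """Score Perceived Stress Scale."""
--     positive_items = [3, 4, 6, 7]
--     score = sum(responses) + sum(4 - 2 * responses[i]
--                                  for i in positive_items if i < len(responses))
--     if score <= 13:
--         severity = "Low Stress"
--         color    = "#4CAF50"
--     elif score <= 26:
--         severity = "Moderate Stress"
--         color    = "#FF9800"
--     else:
--         severity = "High Stress"
--         color    = "#E91E63"
--     return score, severity, color
-- ===== Notes on version B (the rewrite author's own statement) =====
-- stated objective: simpler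
-- what changed: Replaces the enumerate loop that builds an adjusted copy of the list with a closed-form correction: score = sum(responses) + sum(4 - 2*responses[i]) over the present reverse-scored indices (flipping r to 4-r shifts the total by 4-2r), avoiding the per-element branch and intermediate list.
import Mathlib
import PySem

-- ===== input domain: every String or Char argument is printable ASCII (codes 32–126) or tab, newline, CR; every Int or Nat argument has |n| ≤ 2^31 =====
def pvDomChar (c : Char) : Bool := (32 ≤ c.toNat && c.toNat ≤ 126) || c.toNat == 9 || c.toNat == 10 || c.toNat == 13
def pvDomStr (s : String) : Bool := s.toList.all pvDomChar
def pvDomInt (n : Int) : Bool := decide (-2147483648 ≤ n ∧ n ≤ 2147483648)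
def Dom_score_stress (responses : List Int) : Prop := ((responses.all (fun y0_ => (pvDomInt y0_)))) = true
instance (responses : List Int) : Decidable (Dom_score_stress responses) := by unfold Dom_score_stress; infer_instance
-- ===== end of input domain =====

-- ===== PORT A =====
-- B replaces A's enumerate-and-adjust loop with a sum-plus-correction closed form (objective: simpler).
-- transliteration of A's `for i, r in enumerate(responses)` loop building `adjusted`
def pvAdjust (i : Int) (rs : List Int) : List Int :=
  match rs with
  | [] => []
  | r :: t => (if i ∈ ([3, 4, 6, 7] : List Int) then 4 - r else r) :: pvAdjust (i + 1) t

def score_stress (responses : List Int) : Int × String × String :=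
  let adjusted := pvAdjust 0 responses
  let score := adjusted.foldl (· + ·) 0
  if score ≤ 13 then (score, "Low Stress", "#4CAF50")
  else if score ≤ 26 then (score, "Moderate Stress", "#FF9800")
  else (score, "High Stress", "#E91E63")

-- ===== PORT B =====
def score_stress_alt (responses : List Int) : Int × String × String :=
  let score := responses.foldl (· + ·) 0 +
    (([3, 4, 6, 7] : List Nat).filter (fun i => i < responses.length)).foldl
      (fun acc i => acc + (4 - 2 * responses.getD i 0)) 0
  if score ≤ 13 then (score, "Low Stress", "#4CAF50")
  else if score ≤ 26 then (score, "Moderate Stress", "#FF9800")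
  else (score, "High Stress", "#E91E63")

-- ===== PRECONDITION & SPEC =====
def Spec_score_stress (responses : List Int) (out : Int × String × String) : Prop := out = score_stress_alt responses
instance (responses : List Int) (out : Int × String × String) : Decidable (Spec_score_stress responses out) := by unfold Spec_score_stress; infer_instance

-- ===== CLAIM (what is proved, stated in full; the proofs are below) =====
def Claim_equal_score_stress : Prop := ∀ (responses : List Int), Dom_score_stress responses → Spec_score_stress responses (score_stress responses)

-- ===== LEMMAS AND PROOFS =====

theorem pv_foldl_init (t : List Int) (c : Int) :
    t.foldl (· + ·) c = c + t.foldl (· + ·) 0 := by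
  induction t generalizing c with
  | nil => simp
  | cons x xs ih =>
    simp only [List.foldl_cons]
    rw [ih (c + x), ih (0 + x)]
    ring

theorem pvAdjust_high (t : List Int) (n : Int) (h : 8 ≤ n) : pvAdjust n t = t := by
  induction t generalizing n with
  | nil => rfl
  | cons x xs ih =>
    have hn : n ∉ ([3, 4, 6, 7] : List Int) := by
      intro hm
      simp only [List.mem_cons, List.not_mem_nil, or_false] at hm
      omega
    simp [pvAdjust, hn, ih (n + 1) (by omega)]

theorem pv_score_eq (rs : List Int) :
    (pvAdjust 0 rs).foldl (· + ·) 0 =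
      rs.foldl (· + ·) 0 +
        (([3, 4, 6, 7] : List Nat).filter (fun i => i < rs.length)).foldl
          (fun acc i => acc + (4 - 2 * rs.getD i 0)) 0 := by
  match rs with
  | [] => decide
  | [a] => norm_num [pvAdjust, List.filter, List.getD]; try ring
  | [a, b] => norm_num [pvAdjust, List.filter, List.getD]; try ring
  | [a, b, c] => norm_num [pvAdjust, List.filter, List.getD]; try ring
  | [a, b, c, d] => norm_num [pvAdjust, List.filter, List.getD]; try ring
  | [a, b, c, d, e] => norm_num [pvAdjust, List.filter, List.getD]; try ring
  | [a, b, c, d, e, f] => norm_num [pvAdjust, List.filter, List.getD]; try ring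
  | [a, b, c, d, e, f, g] => norm_num [pvAdjust, List.filter, List.getD]; try ring
  | a :: b :: c :: d :: e :: f :: g :: h :: t =>
    have ht : pvAdjust 8 t = t := pvAdjust_high t 8 (by omega)
    simp only [pvAdjust, List.foldl_cons, List.filter, List.getD, List.length_cons]
    norm_num [ht]
    rw [pv_foldl_init t (a + b + c + (4 - d) + (4 - e) + f + (4 - g) + (4 - h)),
        pv_foldl_init t (a + b + c + d + e + f + g + h)]
    ring

-- ===== VERDICT (by name: the statement is the Claim_ definition above) =====
theorem score_stress_spec : Claim_equal_score_stress := by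
  intro rs _
  unfold Spec_score_stress score_stress score_stress_alt
  simp only [pv_score_eq]
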